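-- pv_equiv track=rewrite | github.com/dtg01100/batch-file-processor | interface/qt/dialogs/edit_settings_dialog.py | _format_grouped_errors
-- ===== SOURCE A (Python) =====
-- def _format_grouped_errors(errors_by_section: dict[str, list[str]]) -> str:
--     lines: list[str] = []
--     for section, messages in errors_by_section.items():
--         if not messages:
--             continue
--         lines.append(f"{section}:")
--         for message in messages:
--             lines.append(f"- {message}")
--         lines.append("")
--     while lines and not lines[-1]:
--         lines.pop()
--     return "\n".join(lines)
-- ===== SOURCE B (Python) =====
-- def _format_grouped_errors(errors_by_section: dict[str, list[str]]) -> str: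
--     blocks = [
--         "\n".join([f"{section}:"] + [f"- {message}" for message in messages])
--         for section, messages in errors_by_section.items()
--         if messages
--     ]
--     return "\n\n".join(blocks)
-- ===== Notes on version B (the rewrite author's own statement) =====
-- stated objective: simpler
-- what changed: Replaces the flat line list with '' sentinel separators and a trailing-pop while loop by building one joined block string per non-empty section and joining the blocks with '\n\n'.
import Mathlib
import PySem

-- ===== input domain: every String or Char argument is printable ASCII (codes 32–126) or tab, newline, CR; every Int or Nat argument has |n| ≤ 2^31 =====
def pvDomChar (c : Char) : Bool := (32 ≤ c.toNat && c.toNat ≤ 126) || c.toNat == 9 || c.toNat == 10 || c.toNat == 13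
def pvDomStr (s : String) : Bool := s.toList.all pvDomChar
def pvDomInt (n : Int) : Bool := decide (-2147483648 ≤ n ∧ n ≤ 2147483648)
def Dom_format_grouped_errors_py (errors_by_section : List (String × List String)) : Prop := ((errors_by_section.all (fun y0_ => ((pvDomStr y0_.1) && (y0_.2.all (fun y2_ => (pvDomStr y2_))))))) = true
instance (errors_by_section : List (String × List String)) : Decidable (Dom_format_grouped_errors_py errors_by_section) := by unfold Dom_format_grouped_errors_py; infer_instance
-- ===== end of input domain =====

-- B replaces A's flat line list with "" sentinels and a trailing-pop loop by a
-- per-section block string joined with "\n\n" (objective: simpler).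

-- ===== PORT A =====
-- the 'while lines and not lines[-1]: lines.pop()' loop, transcribed as a scan
-- over the reversed list (the head of the reversed list is lines[-1])
def pvPopRev : List String → List String
  | [] => []
  | x :: xs => if x = "" then pvPopRev xs else x :: xs

def format_grouped_errors_py (errors_by_section : List (String × List String)) : String :=
  let lines : List String :=
    errors_by_section.foldl
      (fun lines p =>
        if p.2 = [] then lines
        else ((lines ++ [p.1 ++ ":"]) ++ p.2.map (fun m => "- " ++ m)) ++ [""])
      []
  PySem.Str.join "\n" ((pvPopRev lines.reverse).reverse)

-- ===== PORT B =====
def format_grouped_errors_py_alt (errors_by_section : List (String × List String)) : String :=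
  PySem.Str.join "\n\n"
    (errors_by_section.filterMap
      (fun p =>
        if p.2 = [] then none
        else some (PySem.Str.join "\n" ((p.1 ++ ":") :: p.2.map (fun m => "- " ++ m)))))

-- ===== PRECONDITION & SPEC =====
def Spec_format_grouped_errors_py (errors_by_section : List (String × List String)) (out : String) : Prop := out = format_grouped_errors_py_alt errors_by_section
instance (errors_by_section : List (String × List String)) (out : String) : Decidable (Spec_format_grouped_errors_py errors_by_section out) := by unfold Spec_format_grouped_errors_py; infer_instance

-- ===== CLAIM (what is proved, stated in full; the proofs are below) =====
def Claim_equal_format_grouped_errors_py : Prop := ∀ (errors_by_section : List (String × List String)), Dom_format_grouped_errors_py errors_by_section → Spec_format_grouped_errors_py errors_by_section (format_grouped_errors_py errors_by_section)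

-- ===== LEMMAS AND PROOFS =====

-- A's per-section contribution to its line list
def pvBlkA (p : String × List String) : List String :=
  if p.2 = [] then [] else (p.1 ++ ":") :: (p.2.map (fun m => "- " ++ m) ++ [""])

-- B's per-section group of lines (no trailing sentinel)
def pvGrp (p : String × List String) : Option (List String) :=
  if p.2 = [] then none else some ((p.1 ++ ":") :: p.2.map (fun m => "- " ++ m))

-- groups interleaved with "" sentinels (what A's line list looks like after the pop)
def pvJoinE : List (List String) → List String
  | [] => []
  | [g] => g
  | g :: h :: t => g ++ "" :: pvJoinE (h :: t)

theorem pv_foldA (e : List (String × List String)) (acc : List String) :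
    e.foldl
      (fun lines p =>
        if p.2 = [] then lines
        else ((lines ++ [p.1 ++ ":"]) ++ p.2.map (fun m => "- " ++ m)) ++ [""])
      acc = acc ++ e.flatMap pvBlkA := by
  induction e generalizing acc with
  | nil => simp
  | cons p e ih =>
    rw [List.foldl_cons, ih]
    by_cases h : p.2 = [] <;>
      simp [h, pvBlkA, List.flatMap_cons, List.append_assoc]

theorem pv_popRev_append (a b : List String) :
    pvPopRev (a ++ b) = if pvPopRev a = [] then pvPopRev b else pvPopRev a ++ b := by
  induction a with
  | nil => simp [pvPopRev]
  | cons x a ih =>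
    by_cases h : x = ""
    · simpa [pvPopRev, h] using ih
    · simp [pvPopRev, h]

theorem pv_append_ne_left (s t : String) (h : s.toList ≠ []) : s ++ t ≠ "" := by
  intro hc
  have h2 : s.toList ++ t.toList = [] := by
    simpa [String.toList_append] using congrArg String.toList hc
  simp only [List.append_eq_nil_iff] at h2
  exact h h2.1

theorem pv_append_ne_right (s t : String) (h : t.toList ≠ []) : s ++ t ≠ "" := by
  intro hc
  have h2 : s.toList ++ t.toList = [] := by
    simpa [String.toList_append] using congrArg String.toList hc
  simp only [List.append_eq_nil_iff] at h2
  exact h h2.2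

-- every group made by pvGrp is nonempty and its last element is not ""
theorem pv_grp_shape (p : String × List String) (g : List String) (h : pvGrp p = some g) :
    g ≠ [] ∧ ∀ x ∈ g, x ≠ "" := by
  unfold pvGrp at h
  by_cases hp : p.2 = []
  · simp [hp] at h
  · simp only [hp, if_false, Option.some.injEq] at h
    subst h
    refine ⟨by simp, ?_⟩
    intro x hx
    rcases List.mem_cons.mp hx with rfl | hx
    · exact pv_append_ne_right _ _ (by decide)
    · rcases List.mem_map.mp hx with ⟨m, _, rfl⟩
      exact pv_append_ne_left _ _ (by decide)

theorem pv_popRev_group (g : List String) (hne : g ≠ []) (hx : ∀ x ∈ g, x ≠ "") :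
    pvPopRev ("" :: g.reverse) = g.reverse := by
  rcases List.eq_nil_or_concat g with rfl | ⟨l, x, rfl⟩
  · exact absurd rfl hne
  · have hx' : x ≠ "" := hx x (by simp)
    have h2 : (l.concat x).reverse = x :: l.reverse := by simp
    rw [h2]
    simp [pvPopRev, hx']

theorem pv_joinE_ne_nil (gs : List (List String)) (hgs : ∀ g ∈ gs, g ≠ []) (h : gs ≠ []) :
    pvJoinE gs ≠ [] := by
  match gs with
  | [] => exact absurd rfl h
  | [g] => simpa [pvJoinE] using hgs g (by simp)
  | g :: h' :: t => simp [pvJoinE]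

-- the trailing-pop of A's line list, computed section by section
theorem pv_pop_flat (e : List (String × List String)) :
    pvPopRev (e.flatMap pvBlkA).reverse = (pvJoinE (e.filterMap pvGrp)).reverse := by
  induction e with
  | nil => simp [pvPopRev, pvJoinE]
  | cons p e ih =>
    by_cases hp : p.2 = []
    · simpa [pvBlkA, pvGrp, hp] using ih
    · have hgrp : pvGrp p = some ((p.1 ++ ":") :: p.2.map (fun m => "- " ++ m)) := by
        simp [pvGrp, hp]
      set g : List String := (p.1 ++ ":") :: p.2.map (fun m => "- " ++ m) with hg
      obtain ⟨hgne, hgx⟩ := pv_grp_shape p g hgrp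
      have hblk : pvBlkA p = g ++ [""] := by simp [pvBlkA, hp, hg]
      have hsplit : ((p :: e).flatMap pvBlkA).reverse
          = (e.flatMap pvBlkA).reverse ++ ("" :: g.reverse) := by
        simp [List.flatMap_cons, hblk, List.reverse_append]
      rw [hsplit, pv_popRev_append, ih]
      have hfm : (p :: e).filterMap pvGrp = g :: e.filterMap pvGrp := by
        simp [hgrp]
      by_cases hrest : e.filterMap pvGrp = []
      · have : (pvJoinE (e.filterMap pvGrp)).reverse = [] := by simp [hrest, pvJoinE]
        rw [if_pos this, hfm, hrest]
        simpa [pvJoinE] using pv_popRev_group g hgne hgx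
      · have hgs : ∀ g' ∈ e.filterMap pvGrp, g' ≠ [] := by
          intro g' hg'
          rcases List.mem_filterMap.mp hg' with ⟨p', _, hp'⟩
          exact (pv_grp_shape p' g' hp').1
        have hnn : (pvJoinE (e.filterMap pvGrp)).reverse ≠ [] := by
          simpa using pv_joinE_ne_nil _ hgs hrest
        rw [if_neg hnn, hfm]
        rcases hr : e.filterMap pvGrp with _ | ⟨h', t⟩
        · exact absurd hr hrest
        · simp [pvJoinE, List.reverse_append]
      
-- pvJoinE on the List-Char side
def pvJoinE' : List (List (List Char)) → List (List Char)
  | [] => []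
  | [g] => g
  | g :: h :: t => g ++ [] :: pvJoinE' (h :: t)

theorem pv_joinE'_ne_nil (gs : List (List (List Char))) (hgs : ∀ g ∈ gs, g ≠ []) (h : gs ≠ []) :
    pvJoinE' gs ≠ [] := by
  match gs with
  | [] => exact absurd rfl h
  | [g] => simpa [pvJoinE'] using hgs g (by simp)
  | g :: h' :: t => simp [pvJoinE']

theorem pv_string_toList_inj (s t : String) (h : s.toList = t.toList) : s = t := by
  have := congrArg String.ofList h
  simpa using this

-- Chars.join over an append of two nonempty lists of pieces
theorem pv_join_append (sep : List Char) (a b : List (List Char)) (ha : a ≠ []) (hb : b ≠ []) :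
    PySem.Chars.join sep (a ++ b) = PySem.Chars.join sep a ++ sep ++ PySem.Chars.join sep b := by
  induction a with
  | nil => exact absurd rfl ha
  | cons x a ih =>
    rcases a with _ | ⟨y, a⟩
    · rcases b with _ | ⟨z, b⟩
      · exact absurd rfl hb
      · simp [PySem.Chars.join_cons_cons, PySem.Chars.join_singleton]
    · have := ih (by simp)
      simp only [List.cons_append] at *
      rw [PySem.Chars.join_cons_cons, PySem.Chars.join_cons_cons, this]
      simp [List.append_assoc]

-- joining sentinel-interleaved lines with "\n" = joining per-group strings with "\n\n"
theorem pv_join_joinE (gs : List (List (List Char))) (hgs : ∀ g ∈ gs, g ≠ []) :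
    PySem.Chars.join ['\n'] (pvJoinE' gs)
      = PySem.Chars.join ['\n', '\n'] (gs.map (PySem.Chars.join ['\n'])) := by
  induction gs with
  | nil => simp [pvJoinE', PySem.Chars.join_nil]
  | cons g t ih =>
    rcases t with _ | ⟨h, t⟩
    · simp [pvJoinE', PySem.Chars.join_singleton]
    · have hg : g ≠ [] := hgs g (by simp)
      have ht : ∀ g' ∈ h :: t, g' ≠ [] := fun g' hg' => hgs g' (by simp [hg'])
      have hjoinE_ne : pvJoinE' (h :: t) ≠ [] := pv_joinE'_ne_nil _ ht (by simp)
      have hstep : pvJoinE' (g :: h :: t) = g ++ [] :: pvJoinE' (h :: t) := rfl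
      rw [hstep, pv_join_append ['\n'] g ([] :: pvJoinE' (h :: t)) hg (by simp)]
      rcases hJ : pvJoinE' (h :: t) with _ | ⟨j, js⟩
      · exact absurd hJ hjoinE_ne
      · rw [PySem.Chars.join_cons_cons, ← hJ, ih ht]
        simp [PySem.Chars.join_cons_cons, List.append_assoc]

theorem pv_blocks_map (e : List (String × List String)) :
    List.map (PySem.Chars.join ['\n'] ∘ List.map String.toList) (e.filterMap pvGrp)
      = List.map String.toList
          (e.filterMap (fun p => if p.2 = [] then none
            else some (PySem.Str.join "\n" ((p.1 ++ ":") :: p.2.map (fun m => "- " ++ m))))) := by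
  induction e with
  | nil => rfl
  | cons p e ih =>
    by_cases hp : p.2 = []
    · have h0 : pvGrp p = none := by simp [pvGrp, hp]
      simp [h0, hp, ih]
    · have h1 : pvGrp p = some ((p.1 ++ ":") :: p.2.map (fun m => "- " ++ m)) := by
        simp [pvGrp, hp]
      simp [h1, hp, ih, PySem.Str.toList_join,
        show "\n".toList = ['\n'] by decide]

theorem format_grouped_errors_py_eq (e : List (String × List String)) :
    format_grouped_errors_py e = format_grouped_errors_py_alt e := by
  unfold format_grouped_errors_py format_grouped_errors_py_alt
  simp only [pv_foldA, List.nil_append, pv_pop_flat, List.reverse_reverse]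
  apply pv_string_toList_inj
  rw [PySem.Str.toList_join, PySem.Str.toList_join]
  have hmap : (pvJoinE (e.filterMap pvGrp)).map String.toList
      = pvJoinE' ((e.filterMap pvGrp).map (List.map String.toList)) := by
    generalize e.filterMap pvGrp = gs
    induction gs with
    | nil => rfl
    | cons g t ih =>
      rcases t with _ | ⟨h, t⟩
      · rfl
      · simp only [pvJoinE, pvJoinE', List.map_cons, List.map_append] at *
        rw [ih]
        rfl
  have hnl : "\n".toList = ['\n'] := by decide
  have hnl2 : "\n\n".toList = ['\n', '\n'] := by decide
  rw [hmap, hnl, hnl2, pv_join_joinE]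
  · congr 1
    rw [List.map_map]
    exact pv_blocks_map e
  · intro g hg
    rcases List.mem_map.mp hg with ⟨g', hg', rfl⟩
    rcases List.mem_filterMap.mp hg' with ⟨p, _, hp⟩
    have := (pv_grp_shape p g' hp).1
    simp [this]

-- ===== VERDICT (by name: the statement is the Claim_ definition above) =====
theorem format_grouped_errors_py_spec : Claim_equal_format_grouped_errors_py := by
  intro e _
  unfold Spec_format_grouped_errors_py
  exact format_grouped_errors_py_eq e
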